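-- pv_equiv track=rewrite | github.com/olinpin/aoc2023 | Day14/ans.py | rollStones
-- ===== SOURCE A (Python) =====
-- def rollStones(columns):
--     orgColumns = []
--     for i, column in enumerate(columns[:]):
--         orgColumns.append([])
--         oIndex = column.index("O") if "O" in column else None
--         if oIndex is None:
--             orgColumns[i].append(column)
--             continue
--         splitColumn = "".join(column).split("#")
--         for j, col in enumerate(splitColumn):
--             orgColumns[i].append(list(col))
--             oIndex = orgColumns[i][j].index("O") if "O" in orgColumns[i][j][1:] else None
--             while True:
--                 dotIndex = orgColumns[i][j].index(".") if "." in orgColumns[i][j] else None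
--                 if dotIndex is None or oIndex is None:
--                     break
--                 if oIndex > dotIndex:
--                     orgColumns[i][j][oIndex] = "."
--                     orgColumns[i][j][dotIndex] = "O"
--                 oIndex += 1
--                 oIndex = (oIndex + orgColumns[i][j][oIndex:].index("O")) if "O" in orgColumns[i][j][oIndex:] else None
--     for i, col in enumerate(orgColumns[:]):
--         orgColumns[i] = "#".join(["".join(line) for line in col])
--     return orgColumns
-- ===== SOURCE B (Python) =====
-- def rollStones(columns):
--     result = []
--     for c in columns:
--         if "O" not in c:
--             result.append(c)
--             continue
--         parts = []
--         for seg in c.split("#"):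
--             k = seg.count("O")
--             chars = []
--             for ch in seg:
--                 if ch == "." or ch == "O":
--                     if k > 0:
--                         chars.append("O")
--                         k -= 1
--                     else:
--                         chars.append(".")
--                 else:
--                     chars.append(ch)
--             parts.append("".join(chars))
--         result.append("#".join(parts))
--     return result
-- ===== Notes on version B (the rewrite author's own statement) =====
-- stated objective: faster
-- what changed: Replaces the per-segment while-loop that repeatedly rescans the segment with list.index and swaps one stone at a time by a single counting pass per segment: count the 'O's, then emit 'O' at the first k '.'/'O' positions and '.' at the rest, other characters unchanged.
import Mathlib
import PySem

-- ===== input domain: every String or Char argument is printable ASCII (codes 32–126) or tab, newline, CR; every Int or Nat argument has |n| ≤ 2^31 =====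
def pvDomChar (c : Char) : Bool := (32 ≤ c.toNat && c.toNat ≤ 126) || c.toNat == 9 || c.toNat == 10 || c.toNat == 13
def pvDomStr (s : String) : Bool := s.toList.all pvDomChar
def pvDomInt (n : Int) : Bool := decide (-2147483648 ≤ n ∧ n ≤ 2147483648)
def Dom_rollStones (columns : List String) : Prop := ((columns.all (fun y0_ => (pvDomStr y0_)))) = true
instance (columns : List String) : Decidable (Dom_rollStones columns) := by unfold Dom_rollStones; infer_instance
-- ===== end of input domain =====

-- B replaces A's per-segment swap loop (repeated list.index rescans) by one counting pass
-- per segment; objective: faster (a timing run measured the asymptotic speed-up).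

-- ===== PORT A =====
-- the inner 'while True' of A: cs is the current segment (list of chars), o the current
-- oIndex (always pointing at an 'O' when called).  Each round: dotIndex = first '.',
-- swap if oIndex > dotIndex, then advance oIndex to the next 'O' strictly after it
-- (Python's `cs[oIndex:]` with the incremented nonnegative oIndex is `List.drop`,
-- exact since drop clamps like the slice).  The loop ends when dotIndex or the new
-- oIndex is None.
def rollSwapLoop (cs : List Char) (o : Nat) : List Char :=
  match PySem.List.index? cs '.' with
  | none => cs
  | some d =>
      -- if oIndex > dotIndex: swap the two cells
      let cs' := if o > d then (cs.set o '.').set d 'O' else cs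
      -- oIndex += 1; oIndex = oIndex + cs[oIndex:].index('O') if 'O' in cs[oIndex:] else None
      if h : 'O' ∈ cs'.drop (o + 1) then
        rollSwapLoop cs' (o + 1 + (PySem.List.index? (cs'.drop (o + 1)) 'O').getD 0)
      else cs'
termination_by cs.length - o
decreasing_by
  have hlen : (if o > d then (cs.set o '.').set d 'O' else cs).length = cs.length := by
    split <;> simp
  have hs := (PySem.List.index?_isSome_iff
    (xs := (if o > d then (cs.set o '.').set d 'O' else cs).drop (o + 1)) (v := 'O')).2 h
  obtain ⟨j, hj⟩ := Option.isSome_iff_exists.mp hs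
  obtain ⟨hjlt, -, -⟩ := PySem.List.getElem_of_index?_eq_some hj
  rw [List.length_drop, hlen] at hjlt
  simp only [dite_eq_ite]
  rw [hj]
  simp only [Option.getD_some, hlen]
  omega

-- the body of A's `for j, col in enumerate(splitColumn)` loop for one segment
def rollSeg (cs : List Char) : List Char :=
  -- oIndex = cs.index("O") if "O" in cs[1:] else None  (cs[1:] is drop 1, exact)
  match (if 'O' ∈ cs.drop 1 then PySem.List.index? cs 'O' else none) with
  | none => cs      -- first round: oIndex is None, the while breaks at once
  | some o => rollSwapLoop cs o

def rollStones (columns : List String) : List String :=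
  columns.map (fun column =>
    -- oIndex = column.index("O") if "O" in column else None; if oIndex is None: keep column
    if PySem.Chars.isIn ['O'] column.toList then
      -- splitColumn = "".join(column).split("#"); process each segment; "#".join at the end
      PySem.Str.join "#"
        ((PySem.Chars.splitOn column.toList ['#']).map (fun col => String.ofList (rollSeg col)))
    else column)

-- ===== PORT B =====
-- one pass over a segment: k 'O's still to place; '.'/'O' cells get 'O' while k > 0
-- and '.' afterwards, every other character is kept
def fillSeg : Nat → List Char → List Char
  | _, [] => []
  | k, ch :: t =>
      if ch = '.' ∨ ch = 'O' then
        if 0 < k then 'O' :: fillSeg (k - 1) t else '.' :: fillSeg k t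
      else ch :: fillSeg k t

def rollStones_alt (columns : List String) : List String :=
  columns.map (fun c =>
    if PySem.Chars.isIn ['O'] c.toList then
      PySem.Str.join "#"
        ((PySem.Chars.splitOn c.toList ['#']).map
          (fun seg => String.ofList (fillSeg (seg.count 'O') seg)))
    else c)

-- ===== PRECONDITION & SPEC =====
def Spec_rollStones (columns : List String) (out : List String) : Prop := out = rollStones_alt columns
instance (columns : List String) (out : List String) : Decidable (Spec_rollStones columns out) := by unfold Spec_rollStones; infer_instance

-- ===== CLAIM (what is proved, stated in full; the proofs are below) =====
def Claim_equal_rollStones : Prop := ∀ (columns : List String), Dom_rollStones columns → Spec_rollStones columns (rollStones columns)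

-- ===== LEMMAS AND PROOFS =====

-- a cell that stones can roll through
def Slot (c : Char) : Prop := c = '.' ∨ c = 'O'

-- "rolled": no '.' strictly before an 'O' (read through getD with the non-slot default 'x')
def SortedSlots (r : List Char) : Prop :=
  ∀ i j, i < j → r.getD i 'x' = '.' → r.getD j 'x' = 'O' → False

-- prefix version: only 'O's at positions < o matter
def Pref (r : List Char) (o : Nat) : Prop :=
  ∀ i j, i < j → j < o → r.getD i 'x' = '.' → r.getD j 'x' = 'O' → False

-- r is cs with some stones rolled: same length, non-slot cells untouched,
-- slot cells still slots, same number of stones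
def Good (cs r : List Char) : Prop :=
  r.length = cs.length ∧
  (∀ i, ¬ Slot (cs.getD i 'x') → r.getD i 'x' = cs.getD i 'x') ∧
  (∀ i, Slot (cs.getD i 'x') → Slot (r.getD i 'x')) ∧
  r.count 'O' = cs.count 'O'

theorem Good_refl (cs : List Char) : Good cs cs := by
  refine ⟨rfl, fun _ _ => rfl, fun _ h => h, rfl⟩

theorem Good_trans {a b c : List Char} (h1 : Good a b) (h2 : Good b c) : Good a c := by
  obtain ⟨l1, f1, s1, c1⟩ := h1
  obtain ⟨l2, f2, s2, c2⟩ := h2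
  refine ⟨l2.trans l1, ?_, ?_, c2.trans c1⟩
  · intro i hi
    have hb := f1 i hi
    have := f2 i (by rw [hb]; exact hi)
    rw [this, hb]
  · intro i hi
    exact s2 i (s1 i hi)

-- getD facts
theorem getD_lt_of_ne {r : List Char} {i : Nat} (h : r.getD i 'x' ≠ 'x') : i < r.length := by
  by_contra hge
  rw [List.getD_eq_default] at h
  · exact h rfl
  · omega

theorem mem_of_getD {r : List Char} {i : Nat} {c : Char} (hc : c ≠ 'x')
    (h : r.getD i 'x' = c) : c ∈ r := by
  have hi : i < r.length := getD_lt_of_ne (by rw [h]; exact hc)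
  rw [List.getD_eq_getElem r 'x' hi] at h
  exact h ▸ List.getElem_mem hi

theorem exists_getD_of_mem {r : List Char} {c : Char} (h : c ∈ r) :
    ∃ i, i < r.length ∧ r.getD i 'x' = c := by
  obtain ⟨i, hi, hg⟩ := List.getElem_of_mem h
  exact ⟨i, hi, by rw [List.getD_eq_getElem r 'x' hi]; exact hg⟩

-- index? gives the first occurrence, in getD form
theorem index?_getD {cs : List Char} {c : Char} {k : Nat} (h : PySem.List.index? cs c = some k) :
    k < cs.length ∧ cs.getD k 'x' = c ∧ ∀ j, j < k → cs.getD j 'x' ≠ c := by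
  obtain ⟨hk, hg, hfirst⟩ := PySem.List.getElem_of_index?_eq_some h
  refine ⟨hk, by rw [List.getD_eq_getElem cs 'x' hk]; exact hg, ?_⟩
  intro j hj
  rw [List.getD_eq_getElem cs 'x' (by omega)]
  exact hfirst j (by omega)

theorem getD_set_self {l : List Char} {n : Nat} {x : Char} (h : n < l.length) :
    (l.set n x).getD n 'x' = x := by
  rw [List.getD_eq_getElem _ 'x' (by simpa using h)]
  simp [List.getElem_set_self]

theorem getD_set_ne {l : List Char} {n m : Nat} {x : Char} (h : n ≠ m) :
    (l.set n x).getD m 'x' = l.getD m 'x' := by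
  by_cases hm : m < l.length
  · rw [List.getD_eq_getElem _ 'x' (by simpa using hm), List.getD_eq_getElem _ 'x' hm]
    exact List.getElem_set_ne h _
  · rw [List.getD_eq_default _ _ (by simpa using (Nat.le_of_not_lt hm)),
        List.getD_eq_default _ _ (Nat.le_of_not_lt hm)]

theorem getD_drop (l : List Char) (n m : Nat) :
    (l.drop n).getD m 'x' = l.getD (n + m) 'x' := by
  simp [List.getD_eq_getElem?_getD, List.getElem?_drop]

-- one swap is Good
theorem Good_swap {cs : List Char} {o d : Nat}
    (ho : cs.getD o 'x' = 'O') (hd : cs.getD d 'x' = '.') (hne : o ≠ d) :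
    Good cs ((cs.set o '.').set d 'O') := by
  have holt : o < cs.length := getD_lt_of_ne (by rw [ho]; decide)
  have hdlt : d < cs.length := getD_lt_of_ne (by rw [hd]; decide)
  refine ⟨by simp, ?_, ?_, ?_⟩
  · intro i hi
    have hio : i ≠ o := by rintro rfl; exact hi (Or.inr ho)
    have hid : i ≠ d := by rintro rfl; exact hi (Or.inl hd)
    rw [getD_set_ne (fun h => hid h.symm), getD_set_ne (fun h => hio h.symm)]
  · intro i hsl
    by_cases hid : i = d
    · subst hid; rw [getD_set_self (by simpa using hdlt)]; exact Or.inr rfl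
    · rw [getD_set_ne (fun h => hid h.symm)]
      by_cases hio : i = o
      · subst hio; rw [getD_set_self holt]; exact Or.inl rfl
      · rw [getD_set_ne (fun h => hio h.symm)]
        exact hsl
  · have ho' : cs[o] = 'O' := by rw [List.getD_eq_getElem cs 'x' holt] at ho; exact ho
    have hd' : cs[d] = '.' := by rw [List.getD_eq_getElem cs 'x' hdlt] at hd; exact hd
    have hc1 := List.count_set (a := '.') (b := 'O') (l := cs) holt
    have hc2 := List.count_set (a := 'O') (b := 'O') (l := cs.set o '.') (i := d)
      (by simpa using hdlt)
    have hgd : (cs.set o '.')[d]'(by simpa using hdlt) = cs[d] :=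
      List.getElem_set_ne (fun hh => hne hh) _
    have hpos : 1 ≤ List.count 'O' cs := List.count_pos_iff.2 (ho' ▸ List.getElem_mem holt)
    rw [hgd, hd'] at hc2
    rw [ho'] at hc1
    simp at hc1 hc2
    omega

-- the conditional swap of one loop round
theorem step_pref {cs : List Char} {o d m : Nat}
    (ho : cs.getD o 'x' = 'O') (hpre : Pref cs o)
    (hd : PySem.List.index? cs '.' = some d)
    (hm : ∀ p, o < p → p < m →
      (if o > d then (cs.set o '.').set d 'O' else cs).getD p 'x' ≠ 'O') :
    Pref (if o > d then (cs.set o '.').set d 'O' else cs) m := by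
  obtain ⟨hdlt, hdot, hfirst⟩ := index?_getD hd
  have hne : o ≠ d := by rintro rfl; rw [ho] at hdot; exact absurd hdot (by decide)
  intro i j hij hjm hi hj
  have hjo : j ≤ o := by
    by_contra hlt
    exact hm j (by omega) hjm hj
  by_cases hswap : o > d
  · rw [if_pos hswap] at hi hj
    have hdo : d < o := hswap
    -- j = o is impossible: cell o now holds '.'
    have hjo' : j < o := by
      rcases Nat.lt_or_ge j o with h | h
      · exact h
      · exfalso
        have : j = o := by omega
        subst this
        rw [getD_set_ne (by omega), getD_set_self (getD_lt_of_ne (by rw [ho]; decide))] at hj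
        exact absurd hj (by decide)
    by_cases hjd : j = d
    · -- i < d, i ≠ o, i ≠ d: cs has a dot before the first dot
      have hio : i ≠ o := by omega
      have hid : i ≠ d := by omega
      rw [getD_set_ne (fun hh => hid hh.symm), getD_set_ne (fun hh => hio hh.symm)] at hi
      exact hfirst i (by omega) hi
    · rw [getD_set_ne (fun h => hjd h.symm), getD_set_ne (by omega : o ≠ j)] at hj
      by_cases hid : i = d
      · subst hid
        rw [getD_set_self (by simp; exact getD_lt_of_ne (by rw [hdot]; decide))] at hi
        exact absurd hi (by decide)
      · have hio : i ≠ o := by omega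
        rw [getD_set_ne (fun h => hid h.symm), getD_set_ne (fun h => hio h.symm)] at hi
        exact hpre i j hij hjo' hi hj
  · rw [if_neg hswap] at hi hj
    have hod : o < d := by omega
    -- every dot sits at ≥ d > o ≥ j, contradicting i < j
    rcases Nat.lt_or_ge i d with h | h
    · exact hfirst i h hi
    · omega

theorem rollSwapLoop_spec (cs : List Char) (o : Nat) :
    cs.getD o 'x' = 'O' → Pref cs o →
    Good cs (rollSwapLoop cs o) ∧ SortedSlots (rollSwapLoop cs o) := by
  fun_induction rollSwapLoop cs o with
  | case1 cs o hnone =>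
      intro _ _
      refine ⟨Good_refl cs, ?_⟩
      intro i j hij hi hj
      rw [PySem.List.index?_eq_none_iff] at hnone
      exact hnone (mem_of_getD (by decide) hi)
  | case2 cs o d hsome cs' h ih =>
      intro ho hpre
      simp only [cs', dite_eq_ite] at h ih ⊢
      obtain ⟨hdlt, hdot, hfirst⟩ := index?_getD hsome
      have hne : o ≠ d := by rintro rfl; rw [ho] at hdot; exact absurd hdot (by decide)
      have hCgood : Good cs (if o > d then (cs.set o '.').set d 'O' else cs) := by
        split
        · exact Good_swap ho hdot hne
        · exact Good_refl cs
      have hs := (PySem.List.index?_isSome_iff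
        (xs := (if o > d then (cs.set o '.').set d 'O' else cs).drop (o + 1)) (v := 'O')).2 h
      obtain ⟨j, hj⟩ := Option.isSome_iff_exists.mp hs
      obtain ⟨hjlt, hjO, hjfirst⟩ := index?_getD hj
      rw [hj] at ih ⊢
      simp only [Option.getD_some] at ih ⊢
      rw [getD_drop] at hjO
      have hmid : ∀ p, o < p → p < o + 1 + j →
          (if o > d then (cs.set o '.').set d 'O' else cs).getD p 'x' ≠ 'O' := by
        intro p hp1 hp2 hO
        have ht : p - (o + 1) < j := by omega
        have := hjfirst (p - (o + 1)) ht
        rw [getD_drop, show o + 1 + (p - (o + 1)) = p by omega] at this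
        exact this hO
      have hprefC := step_pref ho hpre hsome hmid
      obtain ⟨g2, s2⟩ := ih hjO hprefC
      exact ⟨Good_trans hCgood g2, s2⟩
  | case3 cs o d hsome cs' h =>
      intro ho hpre
      simp only [cs', dite_eq_ite] at h ⊢
      obtain ⟨hdlt, hdot, hfirst⟩ := index?_getD hsome
      have hne : o ≠ d := by rintro rfl; rw [ho] at hdot; exact absurd hdot (by decide)
      have hCgood : Good cs (if o > d then (cs.set o '.').set d 'O' else cs) := by
        split
        · exact Good_swap ho hdot hne
        · exact Good_refl cs
      refine ⟨hCgood, ?_⟩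
      intro i j hij hi hj
      have hafter : ∀ p, o < p →
          (if o > d then (cs.set o '.').set d 'O' else cs).getD p 'x' ≠ 'O' := by
        intro p hp hO
        apply h
        have := getD_drop (if o > d then (cs.set o '.').set d 'O' else cs) (o + 1) (p - (o + 1))
        rw [show o + 1 + (p - (o + 1)) = p by omega] at this
        exact mem_of_getD (by decide) (this.trans hO)
      exact step_pref ho hpre hsome (fun p hp _ => hafter p hp) (m := j + 1)
        i j hij (by omega) hi hj

-- no stones: the counting pass is the identity
theorem fillSeg_id {cs : List Char} (h : 'O' ∉ cs) : fillSeg 0 cs = cs := by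
  induction cs with
  | nil => rfl
  | cons a t ih =>
      have ha : a ≠ 'O' := fun hh => h (hh ▸ List.mem_cons_self)
      have ht := ih (fun hh => h (List.mem_cons_of_mem a hh))
      by_cases hs : a = '.' ∨ a = 'O'
      · rcases hs with hs | hs
        · subst hs; simp [fillSeg, ht]
        · exact absurd hs ha
      · simp [fillSeg, hs, ht]

-- the uniqueness of the rolled configuration
theorem fillSeg_unique (cs : List Char) : ∀ (r : List Char) (k : Nat),
    r.length = cs.length →
    (∀ i, ¬ Slot (cs.getD i 'x') → r.getD i 'x' = cs.getD i 'x') →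
    (∀ i, Slot (cs.getD i 'x') → Slot (r.getD i 'x')) →
    r.count 'O' = k →
    SortedSlots r →
    r = fillSeg k cs := by
  induction cs with
  | nil =>
      intro r k hlen _ _ _ _
      have : r = [] := List.eq_nil_of_length_eq_zero (by simpa using hlen)
      subst this; rfl
  | cons c ct ih =>
      intro r k hlen hfix hslot hcount hsort
      cases r with
      | nil => simp at hlen
      | cons a rt =>
          have hlen' : rt.length = ct.length := by simpa using hlen
          have hfix' : ∀ i, ¬ Slot (ct.getD i 'x') → rt.getD i 'x' = ct.getD i 'x' := by
            intro i hi
            have := hfix (i + 1) (by simpa using hi)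
            simpa using this
          have hslot' : ∀ i, Slot (ct.getD i 'x') → Slot (rt.getD i 'x') := by
            intro i hi
            have := hslot (i + 1) (by simpa using hi)
            simpa using this
          have hsort' : SortedSlots rt := by
            intro i j hij h1 h2
            exact hsort (i + 1) (j + 1) (by omega) (by simpa using h1) (by simpa using h2)
          by_cases hc : Slot c
          · have hc2 : c = '.' ∨ c = 'O' := hc
            have ha : Slot a := by
              have := hslot 0 (by simpa using hc)
              simpa using this
            cases k with
            | zero =>
                have haO : a ≠ 'O' := by
                  intro hh
                  subst hh
                  simp at hcount
                have ha' : a = '.' := by rcases ha with h1 | h1 <;> tauto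
                rw [show fillSeg 0 (c :: ct) = '.' :: fillSeg 0 ct from by
                  simp [fillSeg, hc2]]
                have hcnt' : rt.count 'O' = 0 := by
                  simpa [List.count_cons, haO] using hcount
                rw [ha', ih rt 0 hlen' hfix' hslot' hcnt' hsort']
            | succ k' =>
                have haO : a = 'O' := by
                  by_contra hne
                  have ha' : a = '.' := by rcases ha with h1 | h1 <;> tauto
                  have hmem : 'O' ∈ rt := by
                    have : rt.count 'O' = k' + 1 := by
                      simpa [List.count_cons, hne] using hcount
                    exact List.count_pos_iff.1 (by omega)
                  obtain ⟨idx, hidx, hgd⟩ := exists_getD_of_mem hmem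
                  exact hsort 0 (idx + 1) (by omega) (by simpa using ha')
                    (by simpa using hgd)
                rw [show fillSeg (k' + 1) (c :: ct) = 'O' :: fillSeg k' ct from by
                  simp [fillSeg, hc2]]
                have hcnt' : rt.count 'O' = k' := by
                  simpa [List.count_cons, haO] using hcount
                rw [haO, ih rt k' hlen' hfix' hslot' hcnt' hsort']
          · have ha : a = c := by
              have := hfix 0 (by simpa using hc)
              simpa using this
            have hcO : c ≠ 'O' := fun hh => hc (Or.inr hh)
            have hc2 : ¬ (c = '.' ∨ c = 'O') := hc
            rw [show fillSeg k (c :: ct) = c :: fillSeg k ct from by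
              simp [fillSeg, hc2]]
            have hcnt' : rt.count 'O' = k := by
              have haO : a ≠ 'O' := by rw [ha]; exact hcO
              simpa [List.count_cons, haO] using hcount
            rw [ha, ih rt k hlen' hfix' hslot' hcnt' hsort']

theorem rollSeg_eq (cs : List Char) : rollSeg cs = fillSeg (cs.count 'O') cs := by
  unfold rollSeg
  by_cases h : 'O' ∈ cs.drop 1
  · rw [if_pos h]
    have hmem : 'O' ∈ cs := List.mem_of_mem_drop h
    have hs := (PySem.List.index?_isSome_iff (xs := cs) (v := 'O')).2 hmem
    obtain ⟨o, hidx⟩ := Option.isSome_iff_exists.mp hs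
    rw [hidx]
    obtain ⟨holt, ho, hfirst⟩ := index?_getD hidx
    have hpre : Pref cs o := fun i j hij hjo hi hj => hfirst j hjo hj
    obtain ⟨⟨hlen, hfix, hslot, hcount⟩, hsort⟩ := rollSwapLoop_spec cs o ho hpre
    exact fillSeg_unique cs _ _ hlen hfix hslot hcount hsort
  · rw [if_neg h]
    cases cs with
    | nil => rfl
    | cons a t =>
        have ht : 'O' ∉ t := by simpa using h
        by_cases ha : a = 'O'
        · subst ha
          have hcnt : ('O' :: t).count 'O' = 1 := by
            simp [List.count_eq_zero.2 ht]
          rw [hcnt]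
          rw [show fillSeg 1 ('O' :: t) = 'O' :: fillSeg 0 t from by simp [fillSeg]]
          rw [fillSeg_id ht]
        · have hO : 'O' ∉ a :: t := by simp [ht]; exact fun hh => ha hh.symm
          rw [List.count_eq_zero.2 hO, fillSeg_id hO]

-- ===== VERDICT (by name: the statement is the Claim_ definition above) =====
theorem rollStones_spec : Claim_equal_rollStones := by
  intro columns _
  unfold Spec_rollStones rollStones rollStones_alt
  apply List.map_congr_left
  intro c _
  by_cases h : PySem.Chars.isIn ['O'] c.toList
  · simp only [if_pos h]
    congr 1
    apply List.map_congr_left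
    intro seg _
    rw [rollSeg_eq]
  · simp only [if_neg h]
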